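-- pv_equiv track=rewrite | github.com/MrDunn0/Bedtools_copy | sort.py | chr_then_start_ordering
-- ===== SOURCE A (Python) =====
-- def chr_then_start_ordering(line, chr_dict_with_sorted_start, sign):
--     chr, start = line[0], line[1]
--     if chr not in chr_dict_with_sorted_start:
--         chr_dict_with_sorted_start[chr] = [line]
--         return chr_dict_with_sorted_start
--     else:
--         min_pos, max_pos = 0, len(chr_dict_with_sorted_start[chr])
--         while max_pos - min_pos > 0:
--             med = (min_pos + max_pos) // 2
--             if chr_dict_with_sorted_start[chr][med][1] > start:
--                 max_pos = med
--             else: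
--                 min_pos = med + 1
--         chr_dict_with_sorted_start[chr] = \
--             chr_dict_with_sorted_start[chr][:max_pos] + [line] + chr_dict_with_sorted_start[chr][max_pos:]
--         return chr_dict_with_sorted_start
-- ===== SOURCE B (Python) =====
-- def _insert_sorted(line, start, lst):
--     # rebuild the sorted row list recursively, placing line after all rows
--     # whose start field is <= start (matching bisect_right semantics)
--     if lst and lst[0][1] <= start:
--         return [lst[0]] + _insert_sorted(line, start, lst[1:])
--     return [line] + lst
--
--
-- def chr_then_start_ordering(line, chr_dict_with_sorted_start, sign):
--     chr, start = line[0], line[1]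
--     existing = chr_dict_with_sorted_start.get(chr)
--     if existing is None:
--         chr_dict_with_sorted_start[chr] = [line]
--     else:
--         chr_dict_with_sorted_start[chr] = _insert_sorted(line, start, existing)
--     return chr_dict_with_sorted_start
-- ===== Notes on version B (the rewrite author's own statement) =====
-- stated objective: simpler
-- what changed: Replaces the binary search plus slice-based rebuild with a single recursive insertion that walks the sorted row list once and reconstructs it with the new line placed after all rows whose start field is <= start.
import Mathlib
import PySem

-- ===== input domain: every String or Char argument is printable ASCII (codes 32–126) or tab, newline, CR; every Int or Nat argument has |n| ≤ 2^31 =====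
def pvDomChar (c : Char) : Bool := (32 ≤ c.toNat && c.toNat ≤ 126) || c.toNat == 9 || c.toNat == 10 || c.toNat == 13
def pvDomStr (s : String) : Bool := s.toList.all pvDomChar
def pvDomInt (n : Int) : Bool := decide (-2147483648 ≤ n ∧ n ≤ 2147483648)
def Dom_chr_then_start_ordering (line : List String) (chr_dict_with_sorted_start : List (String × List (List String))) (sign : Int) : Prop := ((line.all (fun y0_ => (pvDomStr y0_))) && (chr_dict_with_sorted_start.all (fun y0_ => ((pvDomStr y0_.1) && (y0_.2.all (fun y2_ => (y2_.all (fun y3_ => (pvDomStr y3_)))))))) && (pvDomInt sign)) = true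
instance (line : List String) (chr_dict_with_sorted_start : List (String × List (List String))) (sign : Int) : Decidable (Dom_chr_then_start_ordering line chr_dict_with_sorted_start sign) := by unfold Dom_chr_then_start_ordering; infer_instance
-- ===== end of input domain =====

-- B replaces A's binary search + slice rebuild by one recursive insertion pass over the sorted row
-- list (simpler); both Pythons mutate the dict argument in place — the equivalence proved here is
-- about the RETURN value.

-- ===== PORT A =====
-- Python 'd[k]' first-match lookup on the association list (A's 'chr not in …' / 'd[chr]')
def pvLookup (d : List (String × List (List String))) (k : String) : Option (List (List String)) :=
  match d with
  | [] => none
  | (k', v) :: rest => if k' = k then some v else pvLookup rest k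

-- Python 'd[k] = v': overwrite in place, new keys append
def pvStore (d : List (String × List (List String))) (k : String) (v : List (List String)) : List (String × List (List String)) :=
  match d with
  | [] => [(k, v)]
  | (k', v') :: rest => if k' = k then (k', v) :: rest else (k', v') :: pvStore rest k v

-- A's while loop: min_pos, max_pos binary search; min_pos/max_pos are nonnegative Python ints
-- throughout, so Nat with '/' coincides with Python's '//'
def pvBsLoop (lst : List (List String)) (start : String) (minp maxp : Nat) : Nat :=
  if h : maxp - minp > 0 then
    let med := (minp + maxp) / 2
    if start < PySem.List.pyGetD (PySem.List.pyGetD lst (med : Int) []) 1 "" then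
      pvBsLoop lst start minp med
    else
      pvBsLoop lst start (med + 1) maxp
  else maxp
termination_by maxp - minp
decreasing_by all_goals omega

def chr_then_start_ordering (line : List String) (chr_dict_with_sorted_start : List (String × List (List String))) (sign : Int) : List (String × List (List String)) :=
  let chr := PySem.List.pyGetD line 0 ""
  let start := PySem.List.pyGetD line 1 ""
  match pvLookup chr_dict_with_sorted_start chr with
  | none => pvStore chr_dict_with_sorted_start chr [line]
  | some lst =>
    let maxPos := pvBsLoop lst start 0 lst.length
    pvStore chr_dict_with_sorted_start chr
      (PySem.List.slice lst none (some (maxPos : Int)) ++ [line] ++ PySem.List.slice lst (some (maxPos : Int)) none)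

-- ===== PORT B =====
-- Source B's _insert_sorted: rebuild the row list recursively, line goes after all rows with key ≤ start
def pvInsSorted (line : List String) (start : String) : List (List String) → List (List String)
  | [] => [line]
  | e :: rest =>
      if PySem.List.pyGetD e 1 "" ≤ start then e :: pvInsSorted line start rest
      else line :: e :: rest

-- Source B's 'chr_dict_with_sorted_start[chr] = …' (overwrite in place, new keys append)
def pvSetFirst (k : String) (v : List (List String)) : List (String × List (List String)) → List (String × List (List String))
  | [] => [(k, v)]
  | p :: rest => if p.1 = k then (k, v) :: rest else p :: pvSetFirst k v rest

def chr_then_start_ordering_alt (line : List String) (chr_dict_with_sorted_start : List (String × List (List String))) (sign : Int) : List (String × List (List String)) :=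
  let chr := PySem.List.pyGetD line 0 ""
  let start := PySem.List.pyGetD line 1 ""
  -- Source B's '.get(chr)': first-match association-list lookup
  match List.lookup chr chr_dict_with_sorted_start with
  | none => pvSetFirst chr [line] chr_dict_with_sorted_start
  | some existing => pvSetFirst chr (pvInsSorted line start existing) chr_dict_with_sorted_start

-- ===== PRECONDITION & SPEC =====
-- Pre_ excludes rows with fewer than 2 fields (Python indexes [0]/[1] and raises IndexError when it
-- probes such a row; whether it probes it depends on the search path, so A sometimes still returns)
-- and value lists not sorted by the start field: the dict is documented as 'chr_dict_with_sorted_start'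
-- and A's binary search returns an accidental index on unsorted data.
def Pre_chr_then_start_ordering (line : List String) (chr_dict_with_sorted_start : List (String × List (List String))) (sign : Int) : Prop :=
  2 ≤ line.length ∧
  ∀ p ∈ chr_dict_with_sorted_start, p.1 = PySem.List.pyGetD line 0 "" →
    (∀ e ∈ p.2, 2 ≤ e.length) ∧
    List.Pairwise (fun a b => (PySem.List.pyGetD a 1 "").toList ≤ (PySem.List.pyGetD b 1 "").toList) p.2
instance (line : List String) (chr_dict_with_sorted_start : List (String × List (List String))) (sign : Int) : Decidable (Pre_chr_then_start_ordering line chr_dict_with_sorted_start sign) := by unfold Pre_chr_then_start_ordering; infer_instance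

def pvWitness_chr_then_start_ordering : List String × (List (String × List (List String))) × Int :=
  (["a", "1", "x"], [("a", [["a", "0"], ["a", "2"]]), ("b", [])], 1)

def Spec_chr_then_start_ordering (line : List String) (chr_dict_with_sorted_start : List (String × List (List String))) (sign : Int) (out : List (String × List (List String))) : Prop := out = chr_then_start_ordering_alt line chr_dict_with_sorted_start sign
instance (line : List String) (chr_dict_with_sorted_start : List (String × List (List String))) (sign : Int) (out : List (String × List (List String))) : Decidable (Spec_chr_then_start_ordering line chr_dict_with_sorted_start sign out) := by unfold Spec_chr_then_start_ordering; infer_instance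

-- ===== CLAIM (what is proved, stated in full; the proofs are below) =====
def Claim_equal_chr_then_start_ordering : Prop := ∀ (line : List String) (chr_dict_with_sorted_start : List (String × List (List String))) (sign : Int), Dom_chr_then_start_ordering line chr_dict_with_sorted_start sign → Pre_chr_then_start_ordering line chr_dict_with_sorted_start sign → Spec_chr_then_start_ordering line chr_dict_with_sorted_start sign (chr_then_start_ordering line chr_dict_with_sorted_start sign)

-- ===== LEMMAS AND PROOFS =====

-- the start key of a row
def pvKey (e : List String) : String := PySem.List.pyGetD e 1 ""

def pvP (start : String) : List String → Bool := fun e => decide (pvKey e ≤ start)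

-- the insertion boundary: length of the prefix of rows whose key is ≤ start
def pvBound (lst : List (List String)) (start : String) : Nat :=
  (lst.takeWhile (pvP start)).length

theorem pvBound_le (lst : List (List String)) (start : String) :
    pvBound lst start ≤ lst.length :=
  (List.takeWhile_prefix (pvP start)).sublist.length_le

theorem pvKey_getD (lst : List (List String)) (i : Nat) (h : i < lst.length) :
    PySem.List.pyGetD (PySem.List.pyGetD lst (i : Int) []) 1 "" = pvKey lst[i] := by
  simp [pvKey, PySem.List.pyGetD_natCast, List.getD_eq_getElem?_getD, h]

theorem pvBound_lt_key (lst : List (List String)) (start : String) (i : Nat)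
    (hi : i < pvBound lst start) (hil : i < lst.length) :
    pvKey lst[i] ≤ start := by
  have hpre := List.takeWhile_prefix (l := lst) (pvP start)
  have hi' : i < (lst.takeWhile (pvP start)).length := hi
  have hmem := List.mem_takeWhile_imp (l := lst) (p := pvP start)
    (List.getElem_mem hi')
  have hg : (lst.takeWhile (pvP start))[i] = lst[i] := List.IsPrefix.getElem hpre hi'
  rw [hg] at hmem
  simpa [pvP] using hmem

theorem pvBound_ge_key (lst : List (List String)) (start : String)
    (hb : pvBound lst start < lst.length) :
    ¬ pvKey (lst[pvBound lst start]) ≤ start := by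
  have hsplit := List.takeWhile_append_dropWhile (p := pvP start) (l := lst)
  have hlen := congrArg List.length hsplit
  simp only [List.length_append] at hlen
  have hd : 0 < (lst.dropWhile (pvP start)).length := by
    unfold pvBound at hb; omega
  have h0 := List.dropWhile_get_zero_not (pvP start) lst hd
  have hgq := List.getElem?_append_right
    (l₁ := lst.takeWhile (pvP start)) (l₂ := lst.dropWhile (pvP start))
    (i := pvBound lst start) (le_refl _)
  rw [hsplit] at hgq
  have hz : pvBound lst start - (lst.takeWhile (pvP start)).length = 0 := by
    simp [pvBound]
  rw [hz, List.getElem?_eq_getElem hb, List.getElem?_eq_getElem hd] at hgq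
  have hg : lst[pvBound lst start]'hb = (lst.dropWhile (pvP start))[0]'hd :=
    Option.some.inj hgq
  rw [hg]
  simpa [pvP, List.get] using h0

-- on a sorted list every row at or beyond the boundary has key > start
theorem pvBound_after (lst : List (List String)) (start : String)
    (hsort : List.Pairwise (fun a b => (PySem.List.pyGetD a 1 "").toList ≤ (PySem.List.pyGetD b 1 "").toList) lst)
    (i : Nat) (hi : i < lst.length) (hbi : pvBound lst start ≤ i) :
    ¬ pvKey lst[i] ≤ start := by
  have hb : pvBound lst start < lst.length := lt_of_le_of_lt hbi hi
  have hB := pvBound_ge_key lst start hb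
  rcases eq_or_lt_of_le hbi with h | h
  · simpa [← h] using hB
  · have hrel := (List.pairwise_iff_getElem.mp hsort) (pvBound lst start) i hb hi h
    intro hle
    exact hB (le_trans (by simpa [pvKey] using String.le_iff_toList_le.mpr hrel) hle)

theorem pvBsLoop_eq (lst : List (List String)) (start : String)
    (hsort : List.Pairwise (fun a b => (PySem.List.pyGetD a 1 "").toList ≤ (PySem.List.pyGetD b 1 "").toList) lst) :
    ∀ n minp maxp, maxp - minp ≤ n → minp ≤ pvBound lst start → pvBound lst start ≤ maxp →
      maxp ≤ lst.length → pvBsLoop lst start minp maxp = pvBound lst start := by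
  intro n
  induction n with
  | zero =>
    intro minp maxp h1 h2 h3 h4
    rw [pvBsLoop, dif_neg (by omega : ¬ maxp - minp > 0)]
    omega
  | succ n ih =>
    intro minp maxp h1 h2 h3 h4
    by_cases hgt : maxp - minp > 0
    · rw [pvBsLoop, dif_pos hgt]
      have hmed : (minp + maxp) / 2 < lst.length := by omega
      simp only [pvKey_getD lst _ hmed]
      split
      · next hlt =>
        have hble : pvBound lst start ≤ (minp + maxp) / 2 := by
          by_contra hcon
          exact absurd (pvBound_lt_key lst start _ (by omega) hmed) (not_le.mpr hlt)
        exact ih minp ((minp + maxp) / 2) (by omega) h2 hble (by omega)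
      · next hge =>
        have hlt' : (minp + maxp) / 2 < pvBound lst start := by
          by_contra hcon
          exact pvBound_after lst start hsort _ hmed (by omega) (not_lt.mp hge)
        exact ih ((minp + maxp) / 2 + 1) maxp (by omega) (by omega) h3 h4
    · rw [pvBsLoop, dif_neg hgt]
      omega

theorem pvLookup_mem (d : List (String × List (List String))) (k : String)
    (v : List (List String)) (h : pvLookup d k = some v) : (k, v) ∈ d := by
  induction d with
  | nil => simp [pvLookup] at h
  | cons p rest ih =>
    obtain ⟨k', v'⟩ := p
    rw [pvLookup] at h
    split at h
    · next he => simp_all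
    · exact List.mem_cons_of_mem _ (ih h)

-- B's lookup coincides with A's
theorem pvLookup_eq_lookup (d : List (String × List (List String))) (k : String) :
    List.lookup k d = pvLookup d k := by
  induction d with
  | nil => simp [pvLookup]
  | cons p rest ih =>
    obtain ⟨k', v'⟩ := p
    by_cases h : k' = k
    · simp [pvLookup, List.lookup, h]
    · have hb : (k == k') = false := by simp [Ne.symm h]
      simp [pvLookup, List.lookup, h, hb, ih]

-- B's store coincides with A's
theorem pvSetFirst_eq_store (k : String) (v : List (List String))
    (d : List (String × List (List String))) : pvSetFirst k v d = pvStore d k v := by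
  induction d with
  | nil => rfl
  | cons p rest ih =>
    obtain ⟨k', v'⟩ := p
    by_cases h : k' = k <;> simp [pvSetFirst, pvStore, h, ih]

-- B's recursive insertion splits the list at the boundary
theorem pvInsSorted_eq (line : List String) (start : String) (lst : List (List String)) :
    pvInsSorted line start lst =
      lst.takeWhile (pvP start) ++ line :: lst.dropWhile (pvP start) := by
  induction lst with
  | nil => rfl
  | cons e rest ih =>
    by_cases h : pvKey e ≤ start
    · simp [pvInsSorted, pvKey] at h ⊢
      simp [h, pvP, pvKey, ih]
    · simp [pvInsSorted, pvKey] at h ⊢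
      simp [h, pvP, pvKey]

-- A's slice rebuild at the boundary index is the same split
theorem pvSlice_eq (line : List String) (start : String) (lst : List (List String)) :
    PySem.List.slice lst none (some ((pvBound lst start : Nat) : Int)) ++ [line] ++
      PySem.List.slice lst (some ((pvBound lst start : Nat) : Int)) none =
      lst.takeWhile (pvP start) ++ line :: lst.dropWhile (pvP start) := by
  rw [PySem.List.slice_to_natCast, PySem.List.slice_from_natCast]
  have htake : lst.take (pvBound lst start) = lst.takeWhile (pvP start) :=
    (List.prefix_iff_eq_take.mp (List.takeWhile_prefix (pvP start))).symm
  have hdrop : lst.drop (pvBound lst start) = lst.dropWhile (pvP start) := by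
    have h := List.drop_left (l₁ := lst.takeWhile (pvP start)) (l₂ := lst.dropWhile (pvP start))
    rwa [List.takeWhile_append_dropWhile] at h
  rw [htake, hdrop]
  simp

-- ===== VERDICT (by name: the statement is the Claim_ definition above) =====
theorem chr_then_start_ordering_spec : Claim_equal_chr_then_start_ordering := by
  intro line d sign _ hpre
  unfold Spec_chr_then_start_ordering
  rcases hpre with ⟨_, hvals⟩
  cases hlk : pvLookup d (PySem.List.pyGetD line 0 "") with
  | none =>
    simp only [chr_then_start_ordering, chr_then_start_ordering_alt,
      pvLookup_eq_lookup, hlk, pvSetFirst_eq_store]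
  | some lst =>
    have hsort := (hvals _ (pvLookup_mem _ _ _ hlk) rfl).2
    have hidx : pvBsLoop lst (PySem.List.pyGetD line 1 "") 0 lst.length =
        pvBound lst (PySem.List.pyGetD line 1 "") :=
      pvBsLoop_eq lst _ hsort lst.length 0 lst.length (by omega) (by omega)
        (pvBound_le _ _) (le_refl _)
    simp only [chr_then_start_ordering, chr_then_start_ordering_alt,
      pvLookup_eq_lookup, hlk, pvSetFirst_eq_store, hidx, pvSlice_eq, pvInsSorted_eq]
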